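-- pv_equiv track=rewrite | github.com/YangForever/COP514Group | guifinal/cwgui/CBC_main.py | GenDeBlocks
-- ===== SOURCE A (Python) =====
-- def GenDeBlocks(hex_str):
--     #print hex_str
--     bina_str = ''.join([ '{0:04b}'.format(int(s, 16), 2) for s in hex_str])
--     #print len(bina_str)
--     en_blocks = []
--     i = 0
--     #print len(bina_str)
--     while i < len(bina_str):
--         en_blocks.append([bina_str[i:i+64]])
--         i += 64
--     #print en_blocks
--     return en_blocks
-- ===== SOURCE B (Python) =====
-- def GenDeBlocks(hex_str):
--     # One pass: walk the hex string in 16-char windows and build each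
--     # 64-bit block directly, instead of materialising the full binary
--     # string and re-slicing it.
--     blocks = []
--     for i in range(0, len(hex_str), 16):
--         block = ''.join('{0:04b}'.format(int(c, 16)) for c in hex_str[i:i + 16])
--         blocks.append([block])
--     return blocks
-- ===== Notes on version B (the rewrite author's own statement) =====
-- stated objective: alternative
-- what changed: B slices the hex string itself into 16-character windows and emits each 64-bit block directly in one pass, instead of concatenating all per-character 4-bit codes into one big binary string and then re-slicing it in a second while-loop.
import Mathlib
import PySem

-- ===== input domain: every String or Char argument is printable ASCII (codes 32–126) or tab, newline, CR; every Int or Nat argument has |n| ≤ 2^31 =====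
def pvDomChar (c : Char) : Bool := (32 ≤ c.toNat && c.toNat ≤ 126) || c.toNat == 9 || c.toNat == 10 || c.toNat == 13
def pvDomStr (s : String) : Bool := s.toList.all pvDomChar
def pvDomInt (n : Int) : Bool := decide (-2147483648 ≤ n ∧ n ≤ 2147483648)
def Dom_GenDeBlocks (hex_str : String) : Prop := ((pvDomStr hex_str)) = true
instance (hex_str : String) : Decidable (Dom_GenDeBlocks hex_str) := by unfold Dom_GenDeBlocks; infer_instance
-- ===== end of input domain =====

-- B slices the hex string itself into 16-char windows and emits each 64-bit block directly
-- in one pass, instead of building the whole binary string and re-slicing it (objective: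
-- alternative decomposition, same cost).

-- shared helper of both Pythons: '{0:04b}'.format(int(c, 16)) — int(c, 16) via
-- PySem.Int.ofCharsBase? (total form with default 0; Pre_ admits exactly the characters on
-- which int(c, 16) returns), and format '{0:04b}' ported by hand: binary digits left-padded
-- with '0' to width 4 (exact for the nonnegative values int(c, 16) yields here).
def hexBits (c : Char) : List Char :=
  let v := (PySem.Int.ofCharsBase? [c] 16).getD 0
  let t := PySem.Int.toBinChars v
  List.replicate (4 - t.length) '0' ++ t

-- ===== PORT A =====
-- A's while-loop over index i (i stays a nonnegative multiple of 64, so a Nat counter)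
def GenDeBlocksLoop (bina : List Char) (i : Nat) : List (List String) :=
  if i < bina.length then
    [String.ofList (PySem.List.slice bina (some (i : Int)) (some ((i : Int) + 64)))]
      :: GenDeBlocksLoop bina (i + 64)
  else []
termination_by bina.length - i
decreasing_by omega

def GenDeBlocks (hex_str : String) : List (List String) :=
  let bina := PySem.Chars.join [] (hex_str.toList.map hexBits)
  GenDeBlocksLoop bina 0

-- ===== PORT B =====
def GenDeBlocks_alt (hex_str : String) : List (List String) :=
  (PySem.List.pyRange 0 (PySem.List.len hex_str.toList) 16).foldl
    (fun blocks i =>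
      blocks ++ [[String.ofList (PySem.Chars.join []
        ((PySem.List.slice hex_str.toList (some i) (some (i + 16))).map hexBits))]])
    []

-- ===== PRECONDITION & SPEC =====
-- exactly the inputs on which A returns: int(c, 16) must succeed on every character
-- (otherwise A raises ValueError), i.e. every character is an ASCII hex digit.
def isHexDigit (c : Char) : Bool :=
  ('0' ≤ c && c ≤ '9') || ('a' ≤ c && c ≤ 'f') || ('A' ≤ c && c ≤ 'F')

def Pre_GenDeBlocks (hex_str : String) : Prop :=
  (hex_str.toList.all isHexDigit) = true
instance (hex_str : String) : Decidable (Pre_GenDeBlocks hex_str) := by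
  unfold Pre_GenDeBlocks; infer_instance

def pvWitness_GenDeBlocks : String := "0123456789abcDEF0"

def Spec_GenDeBlocks (hex_str : String) (out : List (List String)) : Prop := out = GenDeBlocks_alt hex_str
instance (hex_str : String) (out : List (List String)) : Decidable (Spec_GenDeBlocks hex_str out) := by unfold Spec_GenDeBlocks; infer_instance

-- ===== CLAIM (what is proved, stated in full; the proofs are below) =====
def Claim_equal_GenDeBlocks : Prop := ∀ (hex_str : String), Dom_GenDeBlocks hex_str → Pre_GenDeBlocks hex_str → Spec_GenDeBlocks hex_str (GenDeBlocks hex_str)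

-- ===== LEMMAS AND PROOFS =====

-- reference chunkings both loops are reduced to
def chunkA (l : List Char) : List (List String) :=
  if l.isEmpty then []
  else [String.ofList (l.take 64)] :: chunkA (l.drop 64)
termination_by l.length
decreasing_by
  rename_i h
  have : l ≠ [] := by simpa [List.isEmpty_iff] using h
  have := List.length_pos_of_ne_nil this
  simp only [List.length_drop]; omega

def chunkB (l : List Char) : List (List String) :=
  if l.isEmpty then []
  else [String.ofList ((l.take 16).flatMap hexBits)] :: chunkB (l.drop 16)
termination_by l.length
decreasing_by
  rename_i h
  have : l ≠ [] := by simpa [List.isEmpty_iff] using h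
  have := List.length_pos_of_ne_nil this
  simp only [List.length_drop]; omega

theorem chunkA_nil : chunkA [] = [] := by rw [chunkA.eq_def]; rfl

theorem chunkB_nil : chunkB [] = [] := by rw [chunkB.eq_def]; rfl

theorem join_nil_eq_flatten (parts : List (List Char)) :
    PySem.Chars.join [] parts = parts.flatten := by
  show [].intercalate parts = parts.flatten
  simp only [List.intercalate]
  induction parts with
  | nil => simp
  | cons p q ih =>
    cases q with
    | nil => simp
    | cons r t => simp [List.intersperse] at ih ⊢; exact ih

theorem mem_hex_of_cond (c : Char) (h : isHexDigit c = true) :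
    c ∈ (['0','1','2','3','4','5','6','7','8','9','a','b','c','d','e','f',
          'A','B','C','D','E','F'] : List Char) := by
  simp only [isHexDigit, Bool.or_eq_true, Bool.and_eq_true, decide_eq_true_eq] at h
  have hc : c = Char.ofNat c.toNat := (Char.ofNat_toNat c).symm
  obtain (⟨h1, h2⟩ | ⟨h1, h2⟩) | ⟨h1, h2⟩ := h <;>
    [(have hl : 48 ≤ c.toNat := Fin.mk_le_mk.mp h1;
      have hu : c.toNat ≤ 57 := Fin.mk_le_mk.mp h2);
     (have hl : 97 ≤ c.toNat := Fin.mk_le_mk.mp h1;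
      have hu : c.toNat ≤ 102 := Fin.mk_le_mk.mp h2);
     (have hl : 65 ≤ c.toNat := Fin.mk_le_mk.mp h1;
      have hu : c.toNat ≤ 70 := Fin.mk_le_mk.mp h2)] <;>
    interval_cases hn : c.toNat <;> (rw [hc]; decide)

theorem hexBits_length (c : Char) (hc : isHexDigit c = true) :
    (hexBits c).length = 4 := by
  have h := mem_hex_of_cond c hc
  fin_cases h <;> decide

theorem loopA_eq_chunkA (bina : List Char) (i : Nat) :
    GenDeBlocksLoop bina i = chunkA (bina.drop i) := by
  rw [GenDeBlocksLoop, chunkA.eq_def]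
  by_cases h : i < bina.length
  · simp only [h, if_pos]
    have hne : ¬ (bina.drop i).isEmpty = true := by
      simp [List.isEmpty_iff]; omega
    rw [if_neg hne]
    have hslice : PySem.List.slice bina (some (i : Int)) (some ((i : Int) + 64))
        = (bina.drop i).take 64 := by
      have := PySem.List.slice_natCast_add bina i 64
      simpa using this
    rw [hslice, loopA_eq_chunkA bina (i + 64), List.drop_drop]
  · have : (bina.drop i).isEmpty = true := by
      simp; omega
    simp [h, this]
termination_by bina.length - i
decreasing_by omega

theorem pyRange_sixteen_cons (a b : Int) (h : a < b) :
    PySem.List.pyRange a b 16 = a :: PySem.List.pyRange (a + 16) b 16 := by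
  rw [PySem.List.pyRange_of_pos a b (by norm_num),
      PySem.List.pyRange_of_pos (a + 16) b (by norm_num)]
  have hif : (if a < b then ((b - a + 16 - 1) / 16).toNat else 0)
      = (if a + 16 < b then ((b - (a + 16) + 16 - 1) / 16).toNat else 0) + 1 := by
    split_ifs <;> omega
  rw [hif, List.range_succ_eq_map]
  simp only [List.map_cons, List.map_map]
  refine List.cons_eq_cons.mpr ⟨by simp, ?_⟩
  apply List.map_congr_left
  intro k _
  simp only [Function.comp_apply, Nat.succ_eq_add_one]
  push_cast
  ring

theorem pyRange_sixteen_nil (a b : Int) (h : b ≤ a) :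
    PySem.List.pyRange a b 16 = [] := by
  rw [PySem.List.pyRange_of_pos a b (by norm_num), if_neg (by omega)]
  simp

theorem altB_eq_chunkB (chars : List Char) (i : Nat) :
    (PySem.List.pyRange (i : Int) (chars.length : Int) 16).map
      (fun j => [String.ofList (PySem.Chars.join []
        ((PySem.List.slice chars (some j) (some (j + 16))).map hexBits))])
      = chunkB (chars.drop i) := by
  rw [chunkB.eq_def]
  by_cases h : i < chars.length
  · rw [pyRange_sixteen_cons _ _ (by exact_mod_cast h)]
    have hne : ¬ (chars.drop i).isEmpty = true := by
      simp; omega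
    rw [if_neg hne, List.map_cons]
    have hslice : PySem.List.slice chars (some (i : Int)) (some ((i : Int) + 16))
        = (chars.drop i).take 16 := by
      have := PySem.List.slice_natCast_add chars i 16
      simpa using this
    have h16 : ((i : Int) + 16) = ((i + 16 : Nat) : Int) := by push_cast; ring
    rw [hslice, h16, altB_eq_chunkB chars (i + 16), List.drop_drop]
    congr 2
    rw [join_nil_eq_flatten, List.flatMap_def]
  · have hemp : (chars.drop i).isEmpty = true := by
      simp; omega
    rw [if_pos hemp, pyRange_sixteen_nil _ _ (by exact_mod_cast Nat.not_lt.mp h)]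
    rfl
termination_by chars.length - i
decreasing_by omega

theorem flatMap_hexBits_length (l : List Char)
    (hl : ∀ c ∈ l, isHexDigit c = true) :
    (l.flatMap hexBits).length = 4 * l.length := by
  rw [List.length_flatMap]
  have : l.map (fun a => (hexBits a).length) = l.map (fun _ => 4) :=
    List.map_congr_left (fun c hc => hexBits_length c (hl c hc))
  rw [this, List.map_const', List.sum_replicate, smul_eq_mul, Nat.mul_comm]

theorem chunkA_eq_chunkB (l : List Char)
    (hl : ∀ c ∈ l, isHexDigit c = true) :
    chunkA (l.flatMap hexBits) = chunkB l := by
  by_cases h0 : l = []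
  · subst h0; simp only [List.flatMap_nil, chunkA_nil, chunkB_nil]
  · have hlen : (l.flatMap hexBits).length = 4 * l.length := flatMap_hexBits_length l hl
    have hpos : 0 < l.length := List.length_pos_of_ne_nil h0
    have hsplit : l.flatMap hexBits
        = (l.take 16).flatMap hexBits ++ (l.drop 16).flatMap hexBits := by
      conv_lhs => rw [← List.take_append_drop 16 l]
      rw [List.flatMap_append]
    have hlenA : ((l.take 16).flatMap hexBits).length = 4 * min 16 l.length := by
      rw [flatMap_hexBits_length _ (fun c hc => hl c (List.mem_of_mem_take hc))]
      simp [List.length_take]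
    rw [chunkA.eq_def, chunkB.eq_def]
    have hA : ¬ (l.flatMap hexBits).isEmpty = true := by
      simp only [List.isEmpty_iff]
      intro hh
      rw [hh] at hlen
      simp only [List.length_nil] at hlen
      omega
    have hB : ¬ l.isEmpty = true := by simpa [List.isEmpty_iff] using h0
    rw [if_neg hA, if_neg hB]
    by_cases hbig : 16 ≤ l.length
    · have h64 : ((l.take 16).flatMap hexBits).length = 64 := by rw [hlenA, Nat.min_eq_left hbig]
      rw [hsplit, List.take_left' h64, List.drop_left' h64,
          chunkA_eq_chunkB (l.drop 16) (fun c hc => hl c (List.mem_of_mem_drop hc))]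
    · have hsmall : l.length < 16 := by omega
      have ht : l.take 16 = l := List.take_of_length_le (by omega)
      have hd : l.drop 16 = ([] : List Char) := List.drop_of_length_le (by omega)
      have htake : (l.flatMap hexBits).take 64 = l.flatMap hexBits :=
        List.take_of_length_le (by omega)
      have hdrop : (l.flatMap hexBits).drop 64 = ([] : List Char) :=
        List.drop_of_length_le (by omega)
      rw [htake, hdrop, ht, hd, chunkA_nil, chunkB_nil]
termination_by l.length
decreasing_by simp; omega

-- ===== VERDICT (by name: the statement is the Claim_ definition above) =====
theorem GenDeBlocks_spec : Claim_equal_GenDeBlocks := by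
  intro hex_str _ hpre
  have hpre' : ∀ c ∈ hex_str.toList, isHexDigit c = true :=
    List.all_eq_true.mp hpre
  unfold Spec_GenDeBlocks GenDeBlocks GenDeBlocks_alt
  rw [PySem.List.foldl_append_singleton_eq_map]
  simp only [PySem.List.len_eq]
  rw [loopA_eq_chunkA, List.drop_zero, join_nil_eq_flatten, ← List.flatMap_def,
      chunkA_eq_chunkB _ hpre']
  have := altB_eq_chunkB hex_str.toList 0
  simpa using this.symm
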